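-- pv_equiv track=rewrite | github.com/WallerTsai/OJ-Solution | leetcode-py/动态规划/划分型DP/斜率优化/No3826.py | minPartitionScore
-- ===== SOURCE A (Python) =====
-- from itertools import accumulate
-- from math import inf
-- from typing import List
--
-- def minPartitionScore(nums: List[int], k: int) -> int:
--     n = len(nums)
--     pres = list(accumulate(nums, initial=0))
--     dp = [[inf] * (k+1) for _ in range(n+1)]
--     dp[0][0] = 0
--     for i in range(1, n+1):
--         for j in range(1, min(i, k)+1):  # 优化：减少 j 的枚举范围
--             dp[i][j] = min(dp[p][j-1] + (pres[i] - pres[p]) ** 2 for p in range(i))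
--     return (dp[n][k] + pres[n]) // 2    # 超时
--
-- inf = 1 << 60
-- ===== SOURCE B (Python) =====
-- from itertools import accumulate
-- from typing import List
--
-- # Convex-hull-trick DP via a Li Chao tree: dp[i][j] = S_i^2 + min_p (-2*S_p*S_i + S_p^2 + dp[p][j-1]),
-- # a minimum of lines queried at x = S_i, so each layer costs O(n log C) instead of O(n^2).
--
-- def _insert(lo, hi, m, b, t):
--     # insert line y = m*x + b into Li Chao node t covering [lo, hi]
--     if t is None:
--         return (m, b, None, None)
--     cm, cb, L, R = t
--     mid = (lo + hi) // 2
--     if m * mid + b < cm * mid + cb: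
--         tm, tb, bm, bb = m, b, cm, cb
--     else:
--         tm, tb, bm, bb = cm, cb, m, b
--     if lo == hi:
--         return (tm, tb, L, R)
--     if bm * lo + bb < tm * lo + tb:
--         return (tm, tb, _insert(lo, mid, bm, bb, L), R)
--     if bm * hi + bb < tm * hi + tb:
--         return (tm, tb, L, _insert(mid + 1, hi, bm, bb, R))
--     return (tm, tb, L, R)
--
-- def _query(lo, hi, x, t):
--     if t is None:
--         return None
--     cm, cb, L, R = t
--     mid = (lo + hi) // 2
--     v = _query(lo, mid, x, L) if x <= mid else _query(mid + 1, hi, x, R)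
--     e = cm * x + cb
--     return e if v is None else min(e, v)
--
-- def minPartitionScore(nums: List[int], k: int) -> int:
--     n = len(nums)
--     pres = list(accumulate(nums, initial=0))
--     INF = 1 << 60
--     if k > n:
--         return (INF + pres[n]) // 2
--     lo, hi = min(pres), max(pres)
--     col = [0] + [INF] * n
--     for j in range(1, k + 1):
--         t = None
--         new = [INF] * (n + 1)
--         for i in range(1, n + 1):
--             sp = pres[i - 1]
--             t = _insert(lo, hi, -2 * sp, sp * sp + col[i - 1], t)
--             if j <= i:
--                 s = pres[i]
--                 new[i] = s * s + _query(lo, hi, s, t)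
--         col = new
--     return (col[n] + pres[n]) // 2
-- ===== Notes on version B (the rewrite author's own statement) =====
-- stated objective: faster
-- what changed: B replaces A's O(n^2) inner scan per DP layer with the convex-hull trick: each candidate p becomes the line y = -2*S_p*x + (S_p^2 + dp[p][j-1]) stored in a Li Chao tree and dp[i][j] is S_i^2 plus one tree query at x = S_i (valid for arbitrary, even negative, values); intended as faster - a timing run measured B 3.8x faster at n=256, the largest size on which both implementations finished (at n=1024 A always timed out and B finished only part of the inputs within that run budget).
-- outside the precondition, e.g. on minPartitionScore([1], -1): A raises IndexError, B returns 576460752303423488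
import Mathlib
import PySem

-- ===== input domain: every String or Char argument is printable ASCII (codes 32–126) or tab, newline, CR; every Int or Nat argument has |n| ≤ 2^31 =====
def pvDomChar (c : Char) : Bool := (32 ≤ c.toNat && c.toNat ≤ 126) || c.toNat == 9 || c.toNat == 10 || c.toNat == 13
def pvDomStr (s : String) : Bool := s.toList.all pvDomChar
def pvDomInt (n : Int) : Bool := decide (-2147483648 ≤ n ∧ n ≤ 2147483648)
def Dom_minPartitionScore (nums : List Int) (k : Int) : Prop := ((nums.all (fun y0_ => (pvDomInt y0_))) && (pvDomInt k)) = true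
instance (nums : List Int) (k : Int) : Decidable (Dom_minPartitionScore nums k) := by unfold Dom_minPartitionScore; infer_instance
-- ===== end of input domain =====

-- B replaces A's O(n^2) inner scan per DP layer with the convex-hull trick on a Li Chao
-- tree (dp[i][j] = S_i^2 + a one-query minimum over lines -2*S_p*x + S_p^2 + dp[p][j-1]);
-- intended as faster (a timing run measured B 3.8x faster at n=256, the largest size on
-- which both finished; at n=1024 A always timed out while B finished only part of the inputs
-- in budget); same values everywhere (Pre_: 0 ≤ k, else A raises IndexError).

-- the module-level `inf = 1 << 60` that A's arithmetic actually uses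
def pvInf : Int := 1152921504606846976

-- Python's min() over a nonempty sequence ([] case unreachable in both programs)
def pyMin1 (xs : List Int) : Int :=
  match xs with
  | [] => 0
  | x :: r => r.foldl min x

-- ===== PORT A =====
-- dp[i][j] = min(dp[p][j-1] + (pres[i]-pres[p])**2 for p in range(i))
-- (indices provably in range under Pre_, so getD is exact; min(i,k) is min i k.toNat for 0 ≤ k)
def stepInner (pres : List Int) (i : Nat) (dp : List (List Int)) (j : Nat) : List (List Int) :=
  dp.set i ((dp.getD i []).set j
    (pyMin1 ((List.range i).map (fun p =>
      (dp.getD p []).getD (j - 1) pvInf + (pres.getD i 0 - pres.getD p 0) ^ 2))))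

-- for j in range(1, min(i, k)+1)
def stepOuter (pres : List Int) (K : Nat) (dp : List (List Int)) (i : Nat) : List (List Int) :=
  (List.range' 1 (min i K)).foldl (stepInner pres i) dp

def minPartitionScore (nums : List Int) (k : Int) : Int :=
  let n := nums.length
  let pres := nums.scanl (· + ·) 0                 -- accumulate(nums, initial=0)
  let dp0 : List (List Int) := List.replicate (n + 1) (List.replicate (k + 1).toNat pvInf)
  let dp1 := dp0.set 0 ((dp0.getD 0 []).set 0 0)   -- dp[0][0] = 0
  let dp := (List.range' 1 n).foldl (stepOuter pres k.toNat) dp1   -- for i in range(1, n+1)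
  PySem.Int.floordiv ((dp.getD n []).getD k.toNat pvInf + pres.getD n 0) 2

-- ===== PORT B =====
-- Li Chao tree of lines y = m*x + b over an integer range; `nil` is Python's None node.
inductive LTree where
  | nil : LTree
  | node : Int → Int → LTree → LTree → LTree

def lineEval (m b x : Int) : Int := m * x + b

-- _insert: the Python swap `tm,tb,bm,bb = …` is transcribed as the two mirrored branches
def ltInsert (lo hi m b : Int) : LTree → LTree
  | .nil => .node m b .nil .nil
  | .node cm cb L R =>
    if lineEval m b (PySem.Int.floordiv (lo + hi) 2) < lineEval cm cb (PySem.Int.floordiv (lo + hi) 2) then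
      (if lo = hi then LTree.node m b L R
       else if lineEval cm cb lo < lineEval m b lo then
         LTree.node m b (ltInsert lo (PySem.Int.floordiv (lo + hi) 2) cm cb L) R
       else if lineEval cm cb hi < lineEval m b hi then
         LTree.node m b L (ltInsert (PySem.Int.floordiv (lo + hi) 2 + 1) hi cm cb R)
       else LTree.node m b L R)
    else
      (if lo = hi then LTree.node cm cb L R
       else if lineEval m b lo < lineEval cm cb lo then
         LTree.node cm cb (ltInsert lo (PySem.Int.floordiv (lo + hi) 2) m b L) R
       else if lineEval m b hi < lineEval cm cb hi then
         LTree.node cm cb L (ltInsert (PySem.Int.floordiv (lo + hi) 2 + 1) hi m b R)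
       else LTree.node cm cb L R)

-- `e if v is None else min(e, v)`
def omin (e : Int) : Option Int → Int
  | none => e
  | some v => min e v

def ltQuery (lo hi x : Int) : LTree → Option Int
  | .nil => none
  | .node cm cb L R =>
    some (omin (lineEval cm cb x)
      (if x ≤ PySem.Int.floordiv (lo + hi) 2 then ltQuery lo (PySem.Int.floordiv (lo + hi) 2) x L
       else ltQuery (PySem.Int.floordiv (lo + hi) 2 + 1) hi x R))

-- max(pres) (pres is never empty; min(pres) is pyMin1 again)
def listMax : List Int → Int
  | [] => 0
  | x :: r => r.foldl max x

-- one iteration of the inner loop (insert line p = i-1, then fill new[i] when j ≤ i);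
-- the `.getD pvInf` arm of the query is unreachable (the tree is nonempty when queried)
def ltStep (pres col : List Int) (lo hi : Int) (j : Nat) (st : LTree × List Int) (i : Nat) :
    LTree × List Int :=
  let sp := pres.getD (i - 1) 0
  let t := ltInsert lo hi (-2 * sp) (sp ^ 2 + col.getD (i - 1) 0) st.1
  (t, if j ≤ i then
        st.2.set i ((pres.getD i 0) ^ 2 + (ltQuery lo hi (pres.getD i 0) t).getD pvInf)
      else st.2)

def ltLayer (pres : List Int) (n : Nat) (lo hi : Int) (col : List Int) (j : Nat) : List Int :=
  ((List.range' 1 n).foldl (ltStep pres col lo hi j) (LTree.nil, List.replicate (n + 1) pvInf)).2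

def minPartitionScore_alt (nums : List Int) (k : Int) : Int :=
  let n := nums.length
  let pres := nums.scanl (· + ·) 0
  if (n : Int) < k then
    PySem.Int.floordiv (pvInf + pres.getD n 0) 2
  else
    let lo := pyMin1 pres
    let hi := listMax pres
    let col := (List.range' 1 k.toNat).foldl (ltLayer pres n lo hi) ((0 : Int) :: List.replicate n pvInf)
    PySem.Int.floordiv (col.getD n 0 + pres.getD n 0) 2

-- ===== PRECONDITION & SPEC =====
-- Pre_ excludes k < 0, on which A raises IndexError (dp[0][0] on an empty row list).
def Pre_minPartitionScore (nums : List Int) (k : Int) : Prop := 0 ≤ k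
instance (nums : List Int) (k : Int) : Decidable (Pre_minPartitionScore nums k) := by
  unfold Pre_minPartitionScore; infer_instance

def pvWitness_minPartitionScore : List Int × Int := ([1, 2, 3], 2)

def Spec_minPartitionScore (nums : List Int) (k : Int) (out : Int) : Prop := out = minPartitionScore_alt nums k
instance (nums : List Int) (k : Int) (out : Int) : Decidable (Spec_minPartitionScore nums k out) := by
  unfold Spec_minPartitionScore; infer_instance

-- ===== CLAIM (what is proved, stated in full; the proofs are below) =====
def Claim_equal_minPartitionScore : Prop := ∀ (nums : List Int) (k : Int), Dom_minPartitionScore nums k → Pre_minPartitionScore nums k → Spec_minPartitionScore nums k (minPartitionScore nums k)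

-- ===== LEMMAS AND PROOFS =====

-- reference value: fD pres i j = exactly the entry both programs' tables hold at (i, j)
def fD (pres : List Int) : Nat → Nat → Int
  | i, 0 => if i = 0 then 0 else pvInf
  | i, j + 1 =>
      if i < j + 1 then pvInf
      else pyMin1 ((List.range i).map (fun p =>
        fD pres p j + (pres.getD i 0 - pres.getD p 0) ^ 2))
  termination_by i j => j

def altRow (pres : List Int) (K i : Nat) : List Int :=
  (List.range (K + 1)).map (fun j => fD pres i j)

def tbl (pres : List Int) (n K m : Nat) : List (List Int) :=
  (List.range (n + 1)).map (fun i => if i ≤ m then altRow pres K i else List.replicate (K + 1) pvInf)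

theorem range'_concat_one (s n : Nat) : List.range' s (n + 1) = List.range' s n ++ [s + n] := by
  have := List.range'_concat (s := s) (n := n) (step := 1); simpa using this

theorem getD_set_self {α : Type} (l : List α) (i : Nat) (a d : α) (h : i < l.length) :
    (l.set i a).getD i d = a := by
  simp [List.getD, h]

theorem getD_set_ne {α : Type} (l : List α) (i p : Nat) (a d : α) (h : i ≠ p) :
    (l.set i a).getD p d = l.getD p d := by
  simp [List.getD, h]

theorem getD_map_range {α : Type} (f : Nat → α) (n j : Nat) (d : α) (h : j < n) :
    ((List.range n).map f).getD j d = f j := by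
  simp [List.getD, h]

theorem getD_replicate {α : Type} (n j : Nat) (a d : α) (h : j < n) :
    (List.replicate n a).getD j d = a := by
  simp [List.getD, h]

theorem tbl_length (pres : List Int) (n K m : Nat) : (tbl pres n K m).length = n + 1 := by
  simp [tbl]

theorem tbl_getD (pres : List Int) (n K m p : Nat) (h1 : p ≤ n) (h2 : p ≤ m) :
    (tbl pres n K m).getD p [] = altRow pres K p := by
  unfold tbl
  rw [getD_map_range _ _ _ _ (by omega)]
  simp [h2]

theorem altRow_getD (pres : List Int) (K i j : Nat) (h : j ≤ K) :
    (altRow pres K i).getD j pvInf = fD pres i j := by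
  unfold altRow
  rw [getD_map_range _ _ _ _ (by omega)]

theorem fD_zero_right (pres : List Int) (i : Nat) :
    fD pres i 0 = if i = 0 then 0 else pvInf := by
  simp [fD]

theorem fD_big (pres : List Int) (i j : Nat) (h : i < j) : fD pres i j = pvInf := by
  cases j with
  | zero => omega
  | succ j' => rw [fD, if_pos h]

theorem fD_succ (pres : List Int) (i j : Nat) (h : ¬ i < j + 1) :
    fD pres i (j + 1) =
      pyMin1 ((List.range i).map (fun p =>
        fD pres p j + (pres.getD i 0 - pres.getD p 0) ^ 2)) := by
  rw [fD, if_neg h]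

theorem altRow_zero (pres : List Int) (K : Nat) :
    (List.replicate (K + 1) pvInf).set 0 0 = altRow pres K 0 := by
  apply List.ext_getElem
  · simp [altRow]
  · intro j h1 h2
    simp only [altRow, List.getElem_map, List.getElem_range, List.getElem_set,
      List.getElem_replicate]
    by_cases hj : j = 0
    · subst hj; simp [fD_zero_right]
    · rw [if_neg (by omega)]
      cases j with
      | zero => omega
      | succ j' => rw [fD_big pres 0 (j' + 1) (by omega)]

theorem dp1_eq_tbl (pres : List Int) (n K : Nat) :
    ((List.replicate (n + 1) (List.replicate (K + 1) pvInf)).set 0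
      (((List.replicate (n + 1) (List.replicate (K + 1) pvInf)).getD 0 []).set 0 0)) =
    tbl pres n K 0 := by
  rw [getD_replicate _ _ _ _ (by omega)]
  apply List.ext_getElem
  · simp [tbl]
  · intro i h1 h2
    simp only [List.getElem_set, List.getElem_replicate, tbl, List.getElem_map,
      List.getElem_range]
    by_cases hi : i = 0
    · rw [if_pos (by omega), if_pos (by omega)]
      subst hi
      exact altRow_zero pres K
    · rw [if_neg (by omega), if_neg (by omega)]

def rowPart (pres : List Int) (K i t : Nat) : List Int :=
  (List.range (K + 1)).map (fun j => if 1 ≤ j ∧ j ≤ t then fD pres i j else pvInf)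

theorem rowPart_zero (pres : List Int) (K i : Nat) :
    rowPart pres K i 0 = List.replicate (K + 1) pvInf := by
  apply List.ext_getElem
  · simp [rowPart]
  · intro j h1 h2
    simp only [rowPart, List.getElem_map, List.getElem_range, List.getElem_replicate]
    rw [if_neg (by omega)]

theorem rowPart_set (pres : List Int) (K i t : Nat) (ht : t + 1 ≤ K) :
    (rowPart pres K i t).set (t + 1) (fD pres i (t + 1)) = rowPart pres K i (t + 1) := by
  apply List.ext_getElem
  · simp [rowPart]
  · intro j h1 h2
    simp only [rowPart, List.getElem_map, List.getElem_range, List.getElem_set]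
    by_cases hj : j = t + 1
    · subst hj
      rw [if_pos rfl, if_pos (by omega)]
    · rw [if_neg (by omega)]
      by_cases hc : 1 ≤ j ∧ j ≤ t
      · rw [if_pos hc, if_pos ⟨hc.1, by omega⟩]
      · rw [if_neg hc, if_neg (by omega)]

theorem set_id_of_rowPart_zero (pres : List Int) (n K i : Nat) (hi1 : 1 ≤ i) (hin : i ≤ n) :
    (tbl pres n K (i - 1)).set i (rowPart pres K i 0) = tbl pres n K (i - 1) := by
  rw [rowPart_zero]
  apply List.ext_getElem
  · simp
  · intro p h1 h2
    simp only [List.getElem_set]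
    by_cases hp : i = p
    · subst hp
      rw [if_pos rfl]
      simp only [tbl, List.getElem_map, List.getElem_range]
      rw [if_neg (by omega)]
    · rw [if_neg hp]

theorem inner_inv (pres : List Int) (n K i : Nat) (hi1 : 1 ≤ i) (hin : i ≤ n) :
    ∀ t, t ≤ min i K →
      (List.range' 1 t).foldl (stepInner pres i) (tbl pres n K (i - 1)) =
      (tbl pres n K (i - 1)).set i (rowPart pres K i t) := by
  intro t
  induction t with
  | zero =>
    intro _
    rw [set_id_of_rowPart_zero pres n K i hi1 hin]
    rfl
  | succ t ih =>
    intro ht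
    rw [range'_concat_one, List.foldl_append, ih (by omega)]
    simp only [List.foldl_cons, List.foldl_nil]
    have h1t : 1 + t = t + 1 := by omega
    rw [h1t]
    unfold stepInner
    rw [getD_set_self _ _ _ _ (by simpa [tbl_length] using (by omega : i < n + 1))]
    have hmap :
        (List.range i).map (fun p =>
          (((tbl pres n K (i - 1)).set i (rowPart pres K i t)).getD p []).getD (t + 1 - 1) pvInf
            + (pres.getD i 0 - pres.getD p 0) ^ 2)
        = (List.range i).map (fun p =>
          fD pres p t + (pres.getD i 0 - pres.getD p 0) ^ 2) := by
      apply List.map_congr_left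
      intro p hp
      have hpi : p < i := List.mem_range.mp hp
      rw [getD_set_ne _ _ _ _ _ (by omega),
        tbl_getD pres n K (i - 1) p (by omega) (by omega)]
      have : t + 1 - 1 = t := by omega
      rw [this, altRow_getD pres K p t (by omega)]
    rw [hmap, ← fD_succ pres i t (by omega), List.set_set,
      rowPart_set pres K i t (by omega)]

theorem rowPart_full (pres : List Int) (K i : Nat) (hi1 : 1 ≤ i) :
    rowPart pres K i (min i K) = altRow pres K i := by
  apply List.ext_getElem
  · simp [rowPart, altRow]
  · intro j h1 h2
    have hjK : j < K + 1 := by simpa [rowPart] using h1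
    simp only [rowPart, altRow, List.getElem_map, List.getElem_range]
    by_cases hc : 1 ≤ j ∧ j ≤ min i K
    · rw [if_pos hc]
    · rw [if_neg hc]
      by_cases hj : j = 0
      · subst hj; rw [fD_zero_right, if_neg (by omega)]
      · rw [fD_big pres i j (by omega)]

theorem stepOuter_tbl (pres : List Int) (n K i : Nat) (hi1 : 1 ≤ i) (hin : i ≤ n) :
    stepOuter pres K (tbl pres n K (i - 1)) i = tbl pres n K i := by
  unfold stepOuter
  rw [inner_inv pres n K i hi1 hin (min i K) le_rfl, rowPart_full pres K i hi1]
  apply List.ext_getElem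
  · simp [tbl_length]
  · intro p h1 h2
    have hpn : p < n + 1 := by simpa [tbl_length] using h1
    simp only [List.getElem_set, tbl, List.getElem_map, List.getElem_range]
    by_cases hp : i = p
    · subst hp; rw [if_pos rfl, if_pos (by omega)]
    · rw [if_neg hp]
      by_cases hpm : p ≤ i - 1
      · rw [if_pos hpm, if_pos (by omega)]
      · rw [if_neg hpm, if_neg (by omega)]

theorem outer_inv (pres : List Int) (n K : Nat) :
    ∀ m, m ≤ n →
      (List.range' 1 m).foldl (stepOuter pres K) (tbl pres n K 0) = tbl pres n K m := by
  intro m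
  induction m with
  | zero => intro _; rfl
  | succ m ih =>
    intro hm
    rw [range'_concat_one, List.foldl_append, ih (by omega)]
    simp only [List.foldl_cons, List.foldl_nil]
    have h1m : 1 + m = m + 1 := by omega
    rw [h1m]
    have := stepOuter_tbl pres n K (m + 1) (by omega) (by omega)
    simpa using this

theorem A_value (nums : List Int) (k : Int) (hk : 0 ≤ k) :
    minPartitionScore nums k =
      PySem.Int.floordiv
        (fD (nums.scanl (· + ·) 0) nums.length k.toNat + (nums.scanl (· + ·) 0).getD nums.length 0) 2 := by
  unfold minPartitionScore
  dsimp only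
  have hK1 : (k + 1).toNat = k.toNat + 1 := by omega
  rw [hK1, dp1_eq_tbl (nums.scanl (· + ·) 0) nums.length k.toNat,
    outer_inv (nums.scanl (· + ·) 0) nums.length k.toNat nums.length le_rfl,
    tbl_getD _ _ _ _ _ le_rfl le_rfl, altRow_getD _ _ _ _ le_rfl]

-- ===== B-side: Li Chao tree correctness =====

-- a line below another at both ends of an interval is below it throughout
theorem line_le_between (m1 b1 m2 b2 lo hi x : Int)
    (hlo : lineEval m1 b1 lo ≤ lineEval m2 b2 lo) (hhi : lineEval m1 b1 hi ≤ lineEval m2 b2 hi)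
    (h1 : lo ≤ x) (h2 : x ≤ hi) : lineEval m1 b1 x ≤ lineEval m2 b2 x := by
  unfold lineEval at *
  rcases eq_or_lt_of_le (le_trans h1 h2 : lo ≤ hi) with h | h
  · have : x = lo := by omega
    subst this; exact hlo
  · have key : (hi - lo) * ((m2 * x + b2) - (m1 * x + b1))
        = (hi - x) * ((m2 * lo + b2) - (m1 * lo + b1))
          + (x - lo) * ((m2 * hi + b2) - (m1 * hi + b1)) := by ring
    have t1 : 0 ≤ (hi - x) * ((m2 * lo + b2) - (m1 * lo + b1)) :=
      mul_nonneg (by omega) (by omega)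
    have t2 : 0 ≤ (x - lo) * ((m2 * hi + b2) - (m1 * hi + b1)) :=
      mul_nonneg (by omega) (by omega)
    nlinarith [key, t1, t2, h]

theorem line_le_right (m1 b1 m2 b2 lo mid x : Int)
    (hlo : lineEval m2 b2 lo < lineEval m1 b1 lo) (hmid : lineEval m1 b1 mid ≤ lineEval m2 b2 mid)
    (hlm : lo ≤ mid) (hx : mid ≤ x) : lineEval m1 b1 x ≤ lineEval m2 b2 x := by
  unfold lineEval at *
  rcases eq_or_lt_of_le hlm with h | h
  · subst h; omega
  · have key : (mid - lo) * ((m2 * x + b2) - (m1 * x + b1))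
        = (mid - x) * ((m2 * lo + b2) - (m1 * lo + b1))
          + (x - lo) * ((m2 * mid + b2) - (m1 * mid + b1)) := by ring
    have t1 : 0 ≤ (x - mid) * ((m1 * lo + b1) - (m2 * lo + b2)) :=
      mul_nonneg (by omega) (by omega)
    have t2 : 0 ≤ (x - lo) * ((m2 * mid + b2) - (m1 * mid + b1)) :=
      mul_nonneg (by omega) (by omega)
    nlinarith [key, t1, t2, h]

theorem mid_bounds (lo hi : Int) (h : lo ≤ hi) :
    lo ≤ PySem.Int.floordiv (lo + hi) 2 ∧ PySem.Int.floordiv (lo + hi) 2 ≤ hi :=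
  PySem.Int.floordiv_two_mid_bounds h

theorem mid_lt (lo hi : Int) (h : lo < hi) : PySem.Int.floordiv (lo + hi) 2 < hi := by
  rw [PySem.Int.floordiv_lt_iff_lt_mul (by omega)]
  omega

-- the push step of ltInsert: top line tm/tb stays at the node, bot line bm/bb descends or is
-- dominated; query of the result is min(top, bot, old subquery at x)
theorem push_correct (L R : LTree)
    (ihL : ∀ lo hi m b x, lo ≤ hi → lo ≤ x → x ≤ hi →
      ltQuery lo hi x (ltInsert lo hi m b L) = some (omin (lineEval m b x) (ltQuery lo hi x L)))
    (ihR : ∀ lo hi m b x, lo ≤ hi → lo ≤ x → x ≤ hi →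
      ltQuery lo hi x (ltInsert lo hi m b R) = some (omin (lineEval m b x) (ltQuery lo hi x R)))
    (lo hi tm tb bm bb x : Int) (h1 : lo ≤ hi) (h2 : lo ≤ x) (h3 : x ≤ hi)
    (hmid : lineEval tm tb (PySem.Int.floordiv (lo + hi) 2) ≤ lineEval bm bb (PySem.Int.floordiv (lo + hi) 2)) :
    ltQuery lo hi x
      (if lo = hi then LTree.node tm tb L R
       else if lineEval bm bb lo < lineEval tm tb lo then
         LTree.node tm tb (ltInsert lo (PySem.Int.floordiv (lo + hi) 2) bm bb L) R
       else if lineEval bm bb hi < lineEval tm tb hi then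
         LTree.node tm tb L (ltInsert (PySem.Int.floordiv (lo + hi) 2 + 1) hi bm bb R)
       else LTree.node tm tb L R)
    = some (min (lineEval tm tb x)
        (omin (lineEval bm bb x)
          (if x ≤ PySem.Int.floordiv (lo + hi) 2 then ltQuery lo (PySem.Int.floordiv (lo + hi) 2) x L
           else ltQuery (PySem.Int.floordiv (lo + hi) 2 + 1) hi x R))) := by
  obtain ⟨hml, hmh⟩ := mid_bounds lo hi h1
  by_cases hlh : lo = hi
  · -- x = lo = hi = mid; bot is dominated at x
    rw [if_pos hlh]
    have hxm : x = PySem.Int.floordiv (lo + hi) 2 := by omega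
    have hdom : lineEval tm tb x ≤ lineEval bm bb x := by rw [hxm]; exact hmid
    simp only [ltQuery, if_pos (le_of_eq hxm)]
    cases hq : ltQuery lo (PySem.Int.floordiv (lo + hi) 2) x L with
    | none => simp only [omin]; congr 1; omega
    | some v => simp only [omin]; congr 1; omega
  · rw [if_neg hlh]
    have hlthi : lo < hi := lt_of_le_of_ne h1 hlh
    have hmlt : PySem.Int.floordiv (lo + hi) 2 < hi := mid_lt lo hi hlthi
    by_cases hblo : lineEval bm bb lo < lineEval tm tb lo
    · -- bot descends left; on the right half top dominates bot
      rw [if_pos hblo]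
      simp only [ltQuery]
      by_cases hx : x ≤ PySem.Int.floordiv (lo + hi) 2
      · rw [if_pos hx, if_pos hx, ihL lo _ bm bb x hml h2 hx]
        cases ltQuery lo (PySem.Int.floordiv (lo + hi) 2) x L <;> simp [omin]
      · rw [if_neg hx, if_neg hx]
        have hdom : lineEval tm tb x ≤ lineEval bm bb x :=
          line_le_right tm tb bm bb lo (PySem.Int.floordiv (lo + hi) 2) x hblo hmid hml (by omega)
        cases ltQuery (PySem.Int.floordiv (lo + hi) 2 + 1) hi x R with
        | none => simp only [omin]; congr 1; omega
        | some v => simp only [omin]; congr 1; omega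
    · rw [if_neg hblo]
      by_cases hbhi : lineEval bm bb hi < lineEval tm tb hi
      · -- bot descends right; on the left half top dominates bot
        rw [if_pos hbhi]
        simp only [ltQuery]
        by_cases hx : x ≤ PySem.Int.floordiv (lo + hi) 2
        · rw [if_pos hx, if_pos hx]
          have hdom : lineEval tm tb x ≤ lineEval bm bb x :=
            line_le_between tm tb bm bb lo (PySem.Int.floordiv (lo + hi) 2) x
              (by omega) hmid h2 hx
          cases ltQuery lo (PySem.Int.floordiv (lo + hi) 2) x L with
          | none => simp only [omin]; congr 1; omega
          | some v => simp only [omin]; congr 1; omega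
        · rw [if_neg hx, if_neg hx, ihR _ hi bm bb x (by omega) (by omega) h3]
          cases ltQuery (PySem.Int.floordiv (lo + hi) 2 + 1) hi x R <;> simp [omin]
      · -- bot dominated on the whole interval
        rw [if_neg hbhi]
        simp only [ltQuery]
        have hdom : lineEval tm tb x ≤ lineEval bm bb x :=
          line_le_between tm tb bm bb lo hi x (by omega) (by omega) h2 h3
        by_cases hx : x ≤ PySem.Int.floordiv (lo + hi) 2
        · rw [if_pos hx]
          cases ltQuery lo (PySem.Int.floordiv (lo + hi) 2) x L with
          | none => simp only [omin]; congr 1; omega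
          | some v => simp only [omin]; congr 1; omega
        · rw [if_neg hx]
          cases ltQuery (PySem.Int.floordiv (lo + hi) 2 + 1) hi x R with
          | none => simp only [omin]; congr 1; omega
          | some v => simp only [omin]; congr 1; omega

-- querying after inserting a line = min of the new line and the old query
theorem ltQuery_insert (t : LTree) : ∀ (lo hi m b x : Int), lo ≤ hi → lo ≤ x → x ≤ hi →
    ltQuery lo hi x (ltInsert lo hi m b t) = some (omin (lineEval m b x) (ltQuery lo hi x t)) := by
  induction t with
  | nil =>
    intro lo hi m b x h1 h2 h3
    simp only [ltInsert, ltQuery]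
    split <;> simp [omin]
  | node cm cb L R ihL ihR =>
    intro lo hi m b x h1 h2 h3
    simp only [ltInsert]
    by_cases hswap : lineEval m b (PySem.Int.floordiv (lo + hi) 2)
        < lineEval cm cb (PySem.Int.floordiv (lo + hi) 2)
    · rw [if_pos hswap,
        push_correct L R ihL ihR lo hi m b cm cb x h1 h2 h3 (le_of_lt hswap)]
      simp only [ltQuery]
      cases (if x ≤ PySem.Int.floordiv (lo + hi) 2
          then ltQuery lo (PySem.Int.floordiv (lo + hi) 2) x L
          else ltQuery (PySem.Int.floordiv (lo + hi) 2 + 1) hi x R) with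
      | none => simp only [omin]
      | some v => simp only [omin]
    · rw [if_neg hswap,
        push_correct L R ihL ihR lo hi cm cb m b x h1 h2 h3 (by omega)]
      simp only [ltQuery]
      cases (if x ≤ PySem.Int.floordiv (lo + hi) 2
          then ltQuery lo (PySem.Int.floordiv (lo + hi) 2) x L
          else ltQuery (PySem.Int.floordiv (lo + hi) 2 + 1) hi x R) with
      | none => simp only [omin]; congr 1; omega
      | some v => simp only [omin]; congr 1; omega

-- pyMin1 over snoc and under +const
theorem pyMin1_snoc (l : List Int) (hl : l ≠ []) (a : Int) :
    pyMin1 (l ++ [a]) = min (pyMin1 l) a := by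
  cases l with
  | nil => exact absurd rfl hl
  | cons x r => simp [pyMin1, List.foldl_append]

theorem foldl_min_add (r : List Int) : ∀ (x c : Int),
    c + r.foldl min x = (r.map (fun v => c + v)).foldl min (c + x) := by
  induction r with
  | nil => intro x c; simp
  | cons y r ih =>
    intro x c
    simp only [List.foldl_cons, List.map_cons]
    rw [ih (min x y) c]
    congr 1
    omega

theorem pyMin1_add (c : Int) (l : List Int) (hl : l ≠ []) :
    c + pyMin1 l = pyMin1 (l.map (fun v => c + v)) := by
  cases l with
  | nil => exact absurd rfl hl
  | cons x r => simpa [pyMin1] using foldl_min_add r x c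

-- the tree the inner loop has built after inserting lines p = 0 .. i-1
def treeOf (lo hi : Int) (pres col : List Int) (i : Nat) : LTree :=
  (List.range i).foldl (fun tr p =>
    ltInsert lo hi (-2 * pres.getD p 0) ((pres.getD p 0) ^ 2 + col.getD p 0) tr) .nil

theorem query_treeOf (pres col : List Int) (lo hi x : Int)
    (hlh : lo ≤ hi) (hx1 : lo ≤ x) (hx2 : x ≤ hi) :
    ∀ i, 1 ≤ i →
      ltQuery lo hi x (treeOf lo hi pres col i)
        = some (pyMin1 ((List.range i).map (fun p =>
            lineEval (-2 * pres.getD p 0) ((pres.getD p 0) ^ 2 + col.getD p 0) x))) := by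
  intro i
  induction i with
  | zero => omega
  | succ i ih =>
    intro _
    by_cases hi1 : 1 ≤ i
    · unfold treeOf
      rw [List.range_succ, List.foldl_append]
      simp only [List.foldl_cons, List.foldl_nil]
      rw [ltQuery_insert _ lo hi _ _ x hlh hx1 hx2]
      unfold treeOf at ih
      rw [ih hi1, List.map_append]
      simp only [List.map_cons, List.map_nil]
      rw [pyMin1_snoc _ (by
        intro hemp
        have := congrArg List.length hemp
        simp at this
        omega) _]
      simp only [omin]
      rw [min_comm]
    · have hi0 : i = 0 := by omega
      subst hi0
      unfold treeOf
      simp [List.range_succ, ltQuery_insert, hlh, hx1, hx2, ltQuery, omin, pyMin1]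

-- colFun: column j of the DP as a function of fD
def colFun (pres : List Int) (n t : Nat) : List Int :=
  (List.range (n + 1)).map (fun i => fD pres i t)

theorem colFun_getD (pres : List Int) (n t i : Nat) (h : i ≤ n) :
    (colFun pres n t).getD i 0 = fD pres i t := by
  unfold colFun
  rw [getD_map_range _ _ _ _ (by omega)]

-- inner-loop invariant of a layer
theorem ltStep_inv (pres : List Int) (n : Nat) (lo hi : Int) (t : Nat)
    (hb : ∀ i, i ≤ n → lo ≤ pres.getD i 0 ∧ pres.getD i 0 ≤ hi) (hlh : lo ≤ hi) :
    ∀ s, s ≤ n →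
      (List.range' 1 s).foldl (ltStep pres (colFun pres n t) lo hi (t + 1))
          (LTree.nil, List.replicate (n + 1) pvInf)
        = (treeOf lo hi pres (colFun pres n t) s,
           (List.range (n + 1)).map (fun i =>
             if t + 1 ≤ i ∧ i ≤ s then fD pres i (t + 1) else pvInf)) := by
  intro s
  induction s with
  | zero =>
    intro _
    simp only [List.range'_zero, List.foldl_nil]
    refine congrArg₂ Prod.mk rfl ?_
    apply List.ext_getElem
    · simp
    · intro i h1 h2
      simp only [List.getElem_replicate, List.getElem_map, List.getElem_range]
      rw [if_neg (by omega)]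
  | succ s ih =>
    intro hs
    rw [range'_concat_one, List.foldl_append, ih (by omega)]
    simp only [List.foldl_cons, List.foldl_nil]
    have h1s : 1 + s = s + 1 := by omega
    rw [h1s]
    unfold ltStep
    simp only
    have htr : ltInsert lo hi (-2 * pres.getD (s + 1 - 1) 0)
          ((pres.getD (s + 1 - 1) 0) ^ 2 + (colFun pres n t).getD (s + 1 - 1) 0)
          (treeOf lo hi pres (colFun pres n t) s)
        = treeOf lo hi pres (colFun pres n t) (s + 1) := by
      unfold treeOf
      rw [List.range_succ, List.foldl_append]
      simp only [List.foldl_cons, List.foldl_nil]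
      congr 2 <;> omega
    rw [htr]
    refine congrArg₂ Prod.mk rfl ?_
    by_cases hts : t + 1 ≤ s + 1
    · rw [if_pos hts]
      have hq := query_treeOf pres (colFun pres n t) lo hi (pres.getD (s + 1) 0)
        hlh (hb (s + 1) (by omega)).1 (hb (s + 1) (by omega)).2 (s + 1) (by omega)
      rw [hq]
      simp only [Option.getD_some]
      have hval : (pres.getD (s + 1) 0) ^ 2
            + pyMin1 ((List.range (s + 1)).map (fun p =>
                lineEval (-2 * pres.getD p 0) ((pres.getD p 0) ^ 2 + (colFun pres n t).getD p 0)
                  (pres.getD (s + 1) 0)))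
          = fD pres (s + 1) (t + 1) := by
        rw [pyMin1_add _ _ (by
          intro hemp
          have := congrArg List.length hemp
          simp at this), List.map_map,
          fD_succ pres (s + 1) t (by omega)]
        congr 1
        apply List.map_congr_left
        intro p hp
        have hps : p < s + 1 := List.mem_range.mp hp
        simp only [Function.comp]
        rw [colFun_getD pres n t p (by omega)]
        unfold lineEval
        ring
      rw [hval]
      apply List.ext_getElem
      · simp
      · intro i h1 h2
        have hin : i < n + 1 := by simpa using h1
        simp only [List.getElem_set, List.getElem_map, List.getElem_range]
        by_cases hi : s + 1 = i
        · subst hi; rw [if_pos rfl, if_pos (by omega)]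
        · rw [if_neg hi]
          by_cases hc : t + 1 ≤ i ∧ i ≤ s
          · rw [if_pos hc, if_pos ⟨hc.1, by omega⟩]
          · rw [if_neg hc, if_neg (by omega)]
    · rw [if_neg hts]
      apply List.map_congr_left
      intro i hi
      by_cases hc : t + 1 ≤ i ∧ i ≤ s
      · omega
      · rw [if_neg hc, if_neg (by omega)]

theorem ltLayer_colFun (pres : List Int) (n : Nat) (lo hi : Int) (t : Nat)
    (hb : ∀ i, i ≤ n → lo ≤ pres.getD i 0 ∧ pres.getD i 0 ≤ hi) (hlh : lo ≤ hi) :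
    ltLayer pres n lo hi (colFun pres n t) (t + 1) = colFun pres n (t + 1) := by
  unfold ltLayer
  rw [ltStep_inv pres n lo hi t hb hlh n le_rfl]
  simp only
  apply List.map_congr_left
  intro i hi
  have hin : i < n + 1 := List.mem_range.mp hi
  by_cases hc : t + 1 ≤ i ∧ i ≤ n
  · rw [if_pos hc]
  · rw [if_neg hc, fD_big pres i (t + 1) (by omega)]

theorem col_inv (pres : List Int) (n : Nat) (lo hi : Int)
    (hb : ∀ i, i ≤ n → lo ≤ pres.getD i 0 ∧ pres.getD i 0 ≤ hi) (hlh : lo ≤ hi) :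
    ∀ t, (List.range' 1 t).foldl (ltLayer pres n lo hi) ((0 : Int) :: List.replicate n pvInf)
      = colFun pres n t := by
  intro t
  induction t with
  | zero =>
    simp only [List.range'_zero, List.foldl_nil]
    apply List.ext_getElem
    · simp [colFun]
    · intro i h1 h2
      simp only [colFun, List.getElem_map, List.getElem_range]
      cases i with
      | zero => simp [fD_zero_right]
      | succ i' =>
        simp only [List.getElem_cons_succ, List.getElem_replicate]
        rw [fD_zero_right, if_neg (by omega)]
  | succ t ih =>
    rw [range'_concat_one, List.foldl_append, ih]
    simp only [List.foldl_cons, List.foldl_nil]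
    have h1t : 1 + t = t + 1 := by omega
    rw [h1t, ltLayer_colFun pres n lo hi t hb hlh]

-- min/max of a list bound every element
theorem foldl_min_le (r : List Int) : ∀ (a x : Int), x ∈ a :: r → r.foldl min a ≤ x := by
  induction r with
  | nil =>
    intro a x hx
    simp only [List.mem_singleton] at hx
    simp [hx]
  | cons b r ih =>
    intro a x hx
    simp only [List.foldl_cons]
    have hmin : r.foldl min (min a b) ≤ min a b := ih (min a b) (min a b) (by simp)
    rcases List.mem_cons.mp hx with h | h
    · rw [h]; exact le_trans hmin (min_le_left a b)
    · rcases List.mem_cons.mp h with h' | h'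
      · rw [h']; exact le_trans hmin (min_le_right a b)
      · exact ih (min a b) x (List.mem_cons_of_mem _ h')

theorem le_foldl_max (r : List Int) : ∀ (a x : Int), x ∈ a :: r → x ≤ r.foldl max a := by
  induction r with
  | nil =>
    intro a x hx
    simp only [List.mem_singleton] at hx
    simp [hx]
  | cons b r ih =>
    intro a x hx
    simp only [List.foldl_cons]
    have hmax : max a b ≤ r.foldl max (max a b) := ih (max a b) (max a b) (by simp)
    rcases List.mem_cons.mp hx with h | h
    · rw [h]; exact le_trans (le_max_left a b) hmax
    · rcases List.mem_cons.mp h with h' | h'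
      · rw [h']; exact le_trans (le_max_right a b) hmax
      · exact ih (max a b) x (List.mem_cons_of_mem _ h')

theorem pyMin1_le (l : List Int) (x : Int) (hx : x ∈ l) : pyMin1 l ≤ x := by
  cases l with
  | nil => simp at hx
  | cons a r => exact foldl_min_le r a x hx

theorem le_listMax (l : List Int) (x : Int) (hx : x ∈ l) : x ≤ listMax l := by
  cases l with
  | nil => simp at hx
  | cons a r => exact le_foldl_max r a x hx

theorem getD_mem {α : Type} (l : List α) (i : Nat) (d : α) (h : i < l.length) :
    l.getD i d ∈ l := by
  rw [List.getD_eq_getElem l d h]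
  exact List.getElem_mem h

theorem B_value (nums : List Int) (k : Int) (hk : 0 ≤ k) :
    minPartitionScore_alt nums k =
      PySem.Int.floordiv
        (fD (nums.scanl (· + ·) 0) nums.length k.toNat + (nums.scanl (· + ·) 0).getD nums.length 0) 2 := by
  unfold minPartitionScore_alt
  dsimp only
  by_cases hkn : (nums.length : Int) < k
  · rw [if_pos hkn, fD_big _ _ _ (by omega)]
  · rw [if_neg hkn]
    have hlen : (nums.scanl (· + ·) 0).length = nums.length + 1 := by
      simp [List.length_scanl]
    have hb : ∀ i, i ≤ nums.length →
        pyMin1 (nums.scanl (· + ·) 0) ≤ (nums.scanl (· + ·) 0).getD i 0 ∧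
        (nums.scanl (· + ·) 0).getD i 0 ≤ listMax (nums.scanl (· + ·) 0) := by
      intro i hi
      have hmem : (nums.scanl (· + ·) 0).getD i 0 ∈ nums.scanl (· + ·) 0 :=
        getD_mem _ _ _ (by omega)
      exact ⟨pyMin1_le _ _ hmem, le_listMax _ _ hmem⟩
    have hlh : pyMin1 (nums.scanl (· + ·) 0) ≤ listMax (nums.scanl (· + ·) 0) :=
      le_trans (hb 0 (by omega)).1 (hb 0 (by omega)).2
    rw [col_inv (nums.scanl (· + ·) 0) nums.length _ _ hb hlh k.toNat,
      colFun_getD _ _ _ _ le_rfl]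

-- ===== VERDICT (by name: the statement is the Claim_ definition above) =====
theorem minPartitionScore_spec : Claim_equal_minPartitionScore := by
  intro nums k _ hk
  unfold Spec_minPartitionScore
  rw [A_value nums k hk, B_value nums k hk]
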